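-- pv_equiv track=rewrite | github.com/Panhawornd/Bontor | ml-service/app/utils/text_processing.py | infer_preferences_from_text
-- ===== SOURCE A (Python) =====
-- from typing import List, Dict, Any
--
-- def infer_preferences_from_text(text: str) -> Dict[str, str]:
--     """Infer user preferences (no questions asked) from free-form text."""
--     t = (text or "").lower()
--     prefs: Dict[str, str] = {}
--     # Study location preference - always local since we only have Cambodian universities
--     prefs["locationPreference"] = "local"
--     # Work style
--     if any(k in t for k in ["team", "collaborat", "group"]):
--         prefs["workStyle"] = "teamwork"
--     elif any(k in t for k in ["independent", "alone", "solo", "individual"]):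
--         prefs["workStyle"] = "solo"
--     else:
--         prefs["workStyle"] = "mixed"
--     # Learning style
--     if any(k in t for k in ["hands-on", "hands on", "practical", "project", "build", "make"]):
--         prefs["learningStyle"] = "practical"
--     elif any(k in t for k in ["theory", "theoretical", "research", "academic"]):
--         prefs["learningStyle"] = "theory"
--     else:
--         prefs["learningStyle"] = "mixed"
--     # Career focus
--     if any(k in t for k in ["startup", "entrepreneur", "founder"]):
--         prefs["careerFocus"] = "entrepreneurship"
--     elif any(k in t for k in ["industry", "company", "corporate"]):
--         prefs["careerFocus"] = "industry"
--     elif any(k in t for k in ["research", "lab", "academic", "university"]):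
--         prefs["careerFocus"] = "research"
--     else:
--         prefs["careerFocus"] = "industry"
--     return prefs
-- ===== SOURCE B (Python) =====
-- _KEYWORDS = ["team", "collaborat", "group", "independent", "alone", "solo", "individual",
--              "hands-on", "hands on", "practical", "project", "build", "make",
--              "theory", "theoretical", "research", "academic",
--              "startup", "entrepreneur", "founder",
--              "industry", "company", "corporate", "lab", "university"]
--
--
-- def _matched_keywords(t):
--     """One sliding-window pass over t: the set of keywords occurring in t."""
--     found = set()
--     for i in range(len(t) + 1):
--         for kw in _KEYWORDS:
--             if t[i:i + len(kw)] == kw: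
--                 found.add(kw)
--     return found
--
--
-- def _pick(found, rules, default):
--     for value, kws in rules:
--         if any(k in found for k in kws):
--             return value
--     return default
--
--
-- def infer_preferences_from_text(text: str):
--     t = (text or "").lower()
--     found = _matched_keywords(t)
--     return {
--         "locationPreference": "local",
--         "workStyle": _pick(found, [("teamwork", ["team", "collaborat", "group"]),
--                                    ("solo", ["independent", "alone", "solo", "individual"])], "mixed"),
--         "learningStyle": _pick(found, [("practical", ["hands-on", "hands on", "practical", "project", "build", "make"]),
--                                        ("theory", ["theory", "theoretical", "research", "academic"])], "mixed"),
--         "careerFocus": _pick(found, [("entrepreneurship", ["startup", "entrepreneur", "founder"]),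
--                                      ("industry", ["industry", "company", "corporate"]),
--                                      ("research", ["research", "lab", "academic", "university"])], "industry"),
--     }
-- ===== Notes on version B (the rewrite author's own statement) =====
-- stated objective: alternative
-- what changed: Replaces the per-keyword substring-membership cascades with a single sliding-window scan over the text that builds the set of all occurring keywords at once, after which each field is decided by set-membership lookups only.
import Mathlib
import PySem

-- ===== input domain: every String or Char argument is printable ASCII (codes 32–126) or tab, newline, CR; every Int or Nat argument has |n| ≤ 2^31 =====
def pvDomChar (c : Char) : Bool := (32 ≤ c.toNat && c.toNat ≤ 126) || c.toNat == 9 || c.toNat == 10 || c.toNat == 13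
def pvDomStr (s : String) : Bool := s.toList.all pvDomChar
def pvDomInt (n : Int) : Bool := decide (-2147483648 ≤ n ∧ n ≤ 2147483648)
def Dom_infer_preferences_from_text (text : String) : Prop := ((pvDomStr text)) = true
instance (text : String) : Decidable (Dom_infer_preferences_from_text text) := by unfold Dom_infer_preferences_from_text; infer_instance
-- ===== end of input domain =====

-- B replaces the per-keyword substring cascades with one sliding-window scan of the text that
-- collects the set of all occurring keywords, then decides each field by set lookups (objective: alternative).

-- ===== PORT A =====
def infer_preferences_from_text (text : String) : List (String × String) :=
  let t := PySem.Str.lower (if text == "" then "" else text)  -- (text or "").lower()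
  let prefs : PySem.Dict String String := PySem.Dict.empty
  let prefs := prefs.insert "locationPreference" "local"
  let prefs := prefs.insert "workStyle"
    (if ["team", "collaborat", "group"].any (fun k => PySem.Str.isIn k t) then "teamwork"
     else if ["independent", "alone", "solo", "individual"].any (fun k => PySem.Str.isIn k t) then "solo"
     else "mixed")
  let prefs := prefs.insert "learningStyle"
    (if ["hands-on", "hands on", "practical", "project", "build", "make"].any (fun k => PySem.Str.isIn k t) then "practical"
     else if ["theory", "theoretical", "research", "academic"].any (fun k => PySem.Str.isIn k t) then "theory"
     else "mixed")
  let prefs := prefs.insert "careerFocus"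
    (if ["startup", "entrepreneur", "founder"].any (fun k => PySem.Str.isIn k t) then "entrepreneurship"
     else if ["industry", "company", "corporate"].any (fun k => PySem.Str.isIn k t) then "industry"
     else if ["research", "lab", "academic", "university"].any (fun k => PySem.Str.isIn k t) then "research"
     else "industry")
  prefs.items

-- ===== PORT B =====
def pvKeywords : List String :=
  ["team", "collaborat", "group", "independent", "alone", "solo", "individual",
   "hands-on", "hands on", "practical", "project", "build", "make",
   "theory", "theoretical", "research", "academic",
   "startup", "entrepreneur", "founder",
   "industry", "company", "corporate", "lab", "university"]

-- _matched_keywords: one sliding-window pass; t[i:i+len(kw)] == kw ported as PySem.Str.slice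
def pvMatchedKeywords (t : String) : PySem.Set String :=
  (PySem.List.pyRange 0 (PySem.Str.len t + 1)).foldl (fun found i =>
    pvKeywords.foldl (fun found kw =>
      if PySem.Str.slice t (some i) (some (i + PySem.Str.len kw)) == kw then found.add kw
      else found) found) PySem.Set.empty

-- _pick: first rule whose any keyword is in the matched set, else the default
def pvPick (found : PySem.Set String) : List (String × List String) → String → String
  | [], default => default
  | (value, kws) :: rest, default =>
    if kws.any (fun k => found.contains k) then value else pvPick found rest default

def infer_preferences_from_text_alt (text : String) : List (String × String) :=
  let t := PySem.Str.lower (if text == "" then "" else text)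
  let found := pvMatchedKeywords t
  (PySem.Dict.ofList
    [("locationPreference", "local"),
     ("workStyle", pvPick found [("teamwork", ["team", "collaborat", "group"]),
                                 ("solo", ["independent", "alone", "solo", "individual"])] "mixed"),
     ("learningStyle", pvPick found [("practical", ["hands-on", "hands on", "practical", "project", "build", "make"]),
                                     ("theory", ["theory", "theoretical", "research", "academic"])] "mixed"),
     ("careerFocus", pvPick found [("entrepreneurship", ["startup", "entrepreneur", "founder"]),
                                   ("industry", ["industry", "company", "corporate"]),
                                   ("research", ["research", "lab", "academic", "university"])] "industry")]
    : PySem.Dict String String).items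

-- ===== PRECONDITION & SPEC =====
def Spec_infer_preferences_from_text (text : String) (out : List (String × String)) : Prop := out = infer_preferences_from_text_alt text
instance (text : String) (out : List (String × String)) : Decidable (Spec_infer_preferences_from_text text out) := by unfold Spec_infer_preferences_from_text; infer_instance

-- ===== CLAIM (what is proved, stated in full; the proofs are below) =====
def Claim_equal_infer_preferences_from_text : Prop := ∀ (text : String), Dom_infer_preferences_from_text text → Spec_infer_preferences_from_text text (infer_preferences_from_text text)

-- ===== LEMMAS AND PROOFS =====

-- membership in the inner fold over the keyword list
theorem pv_mem_inner (cond : String → Bool) (kws : List String) (s : PySem.Set String) (x : String) :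
    x ∈ kws.foldl (fun s kw => if cond kw then s.add kw else s) s ↔
      x ∈ s ∨ (x ∈ kws ∧ cond x = true) := by
  induction kws generalizing s with
  | nil => simp
  | cons k rest ih =>
    simp only [List.foldl_cons, ih]
    by_cases hk : cond k
    · simp only [hk, if_true, PySem.Set.mem_add, List.mem_cons]
      constructor
      · rintro ((h | rfl) | h)
        · exact Or.inl h
        · exact Or.inr ⟨Or.inl rfl, hk⟩
        · exact Or.inr ⟨Or.inr h.1, h.2⟩
      · rintro (h | ⟨(rfl | h), hc⟩)
        · exact Or.inl (Or.inl h)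
        · exact Or.inl (Or.inr rfl)
        · exact Or.inr ⟨h, hc⟩
    · simp only [hk, List.mem_cons]
      constructor
      · rintro (h | h)
        · exact Or.inl h
        · exact Or.inr ⟨Or.inr h.1, h.2⟩
      · rintro (h | ⟨(rfl | h), hc⟩)
        · exact Or.inl h
        · exact (hk (by simpa using hc)).elim
        · exact Or.inr ⟨h, hc⟩

-- membership in the outer fold over the positions
theorem pv_mem_outer (cond : Int → String → Bool) (l : List Int) (s : PySem.Set String) (x : String) :
    x ∈ l.foldl (fun s i => pvKeywords.foldl (fun s kw => if cond i kw then s.add kw else s) s) s ↔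
      x ∈ s ∨ (x ∈ pvKeywords ∧ ∃ i ∈ l, cond i x = true) := by
  induction l generalizing s with
  | nil => simp
  | cons i rest ih =>
    simp only [List.foldl_cons, ih, pv_mem_inner, List.mem_cons]
    constructor
    · rintro ((h | h) | ⟨hm, j, hj, hc⟩)
      · exact Or.inl h
      · exact Or.inr ⟨h.1, i, Or.inl rfl, h.2⟩
      · exact Or.inr ⟨hm, j, Or.inr hj, hc⟩
    · rintro (h | ⟨hm, j, (rfl | hj), hc⟩)
      · exact Or.inl (Or.inl h)
      · exact Or.inl (Or.inr ⟨hm, hc⟩)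
      · exact Or.inr ⟨hm, j, hj, hc⟩

-- the slice-at-position test is a prefix test on the dropped list
theorem pv_slice_eq_iff (t kw : String) (j : Nat) :
    (PySem.Str.slice t (some (j : Int)) (some ((j : Int) + PySem.Str.len kw)) == kw) = true ↔
      kw.toList <+: t.toList.drop j := by
  rw [beq_iff_eq, String.ext_iff]
  have h : (PySem.Str.slice t (some (j : Int)) (some ((j : Int) + PySem.Str.len kw))).toList
      = PySem.List.slice t.toList (some (j : Int)) (some ((j : Int) + (kw.toList.length : Int))) := by
    simp [PySem.Str.slice, PySem.Str.len_eq]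
  rw [h, PySem.List.slice_natCast_add, List.prefix_iff_eq_take]
  exact ⟨fun h => h.symm, fun h => h.symm⟩

-- the scan finds a keyword iff it occurs in t (for the nonempty keywords of the table)
theorem pv_contains_eq_isIn (t kw : String) (hmem : kw ∈ pvKeywords) (hne : kw.toList ≠ []) :
    (pvMatchedKeywords t).contains kw = PySem.Str.isIn kw t := by
  have hiff : (pvMatchedKeywords t).contains kw = true ↔ PySem.Str.isIn kw t = true := by
    rw [PySem.Set.contains_iff]
    unfold pvMatchedKeywords
    rw [pv_mem_outer (fun i kw => PySem.Str.slice t (some i) (some (i + PySem.Str.len kw)) == kw)]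
    simp only [PySem.Set.empty]
    rw [PySem.Str.isIn, ← PySem.Chars.exists_prefix_drop_iff_isIn]
    constructor
    · rintro (h | ⟨-, i, hi, hc⟩)
      · simp at h
      · rw [PySem.List.mem_pyRange_one] at hi
        obtain ⟨h0, _⟩ := hi
        obtain ⟨j, rfl⟩ := Int.eq_ofNat_of_zero_le h0
        exact ⟨j, (pv_slice_eq_iff t kw j).mp hc⟩
    · rintro ⟨j, hj⟩
      refine Or.inr ⟨hmem, (j : Int), ?_, (pv_slice_eq_iff t kw j).mpr hj⟩
      rw [PySem.List.mem_pyRange_one]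
      refine ⟨by positivity, ?_⟩
      have hlen : 1 ≤ kw.toList.length := by
        cases h : kw.toList with
        | nil => exact (hne h).elim
        | cons a l => simp
      have hdrop : kw.toList.length ≤ (t.toList.drop j).length := hj.length_le
      simp only [List.length_drop] at hdrop
      have : j < t.toList.length + 1 := by omega
      rw [PySem.Str.len_eq]
      exact_mod_cast this
  exact Bool.coe_iff_coe.mp hiff

-- ===== VERDICT (by name: the statement is the Claim_ definition above) =====
theorem infer_preferences_from_text_spec : Claim_equal_infer_preferences_from_text := by
  intro text _
  unfold Spec_infer_preferences_from_text
  unfold infer_preferences_from_text infer_preferences_from_text_alt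
  set t := PySem.Str.lower (if text == "" then "" else text) with ht
  have hmem : ∀ kw, kw ∈ pvKeywords → ((kw ∈ pvMatchedKeywords t) ↔ PySem.Str.isIn kw t = true) := by
    intro kw hk
    have hne : ∀ kw ∈ pvKeywords, kw.toList ≠ [] := by decide
    rw [← PySem.Set.contains_iff, pv_contains_eq_isIn t kw hk (hne kw hk)]
  simp [pvPick, PySem.Dict.ofList, PySem.Dict.insert, PySem.Dict.empty, PySem.Dict.contains, PySem.Dict.update,
    hmem "team" (by decide),
    hmem "collaborat" (by decide),
    hmem "group" (by decide),
    hmem "independent" (by decide),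
    hmem "alone" (by decide),
    hmem "solo" (by decide),
    hmem "individual" (by decide),
    hmem "hands-on" (by decide),
    hmem "hands on" (by decide),
    hmem "practical" (by decide),
    hmem "project" (by decide),
    hmem "build" (by decide),
    hmem "make" (by decide),
    hmem "theory" (by decide),
    hmem "theoretical" (by decide),
    hmem "research" (by decide),
    hmem "academic" (by decide),
    hmem "startup" (by decide),
    hmem "entrepreneur" (by decide),
    hmem "founder" (by decide),
    hmem "industry" (by decide),
    hmem "company" (by decide),
    hmem "corporate" (by decide),
    hmem "lab" (by decide),
    hmem "university" (by decide)]
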